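-- pv_equiv track=rewrite | github.com/AaLexUser/Computer-networks | HW1/scripts/scrambling.py | count_digits3
-- ===== SOURCE A (Python) =====
-- def count_digits3(arr):
--     counter = 0
--     i = 0
--     prev1 = 2
--     prev2 = 2
--     prev3 = 2
--     prev4 = 2
--     while i < len(arr):
--         if arr[i] == 1 and prev1 == 0 and prev2 == 0 and prev3 == 0 and prev4 != 0:
--                 counter += 1
--         prev4 = prev3
--         prev3 = prev2
--         prev2 = prev1
--         prev1 = arr[i]
--         i += 1
--
--     if prev1 == 0 and prev2 == 0 and prev3 == 0 and prev4 != 0: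
--         counter += 1
--     return counter
-- ===== SOURCE B (Python) =====
-- def count_digits3(arr):
--     # Count maximal runs of exactly three consecutive zeros that are
--     # terminated by a 1 or by the end of the array.
--     count = 0
--     run = 0  # length of the current run of consecutive zeros
--     for x in arr:
--         if x == 0:
--             run += 1
--         else:
--             if run == 3 and x == 1:
--                 count += 1
--             run = 0
--     if run == 3:
--         count += 1
--     return count
-- ===== Notes on version B (the rewrite author's own statement) =====
-- stated objective: simpler
-- what changed: Replaces A's four shift registers plus separate post-loop window check by a single zero-run-length counter: count maximal runs of exactly three zeros terminated by a 1 or by end of array.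
import Mathlib
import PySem

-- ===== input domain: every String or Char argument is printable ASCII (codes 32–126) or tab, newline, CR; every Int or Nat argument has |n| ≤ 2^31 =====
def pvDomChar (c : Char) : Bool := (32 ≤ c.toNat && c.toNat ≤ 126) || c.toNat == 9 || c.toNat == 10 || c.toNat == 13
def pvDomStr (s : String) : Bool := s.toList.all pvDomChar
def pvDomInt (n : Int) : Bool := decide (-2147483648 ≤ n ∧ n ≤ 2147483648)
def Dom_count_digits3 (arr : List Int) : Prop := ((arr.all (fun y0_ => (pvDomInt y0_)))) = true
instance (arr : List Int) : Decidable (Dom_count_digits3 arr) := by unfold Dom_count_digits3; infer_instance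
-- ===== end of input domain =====

-- B replaces A's four shift registers and separate post-loop window check by a
-- single zero-run-length counter (count maximal runs of exactly three zeros
-- terminated by a 1 or by end of array); objective: simpler.

-- ===== PORT A =====
-- loop body of A's while-loop: state (counter, prev1, prev2, prev3, prev4)
def pvStepA (st : Int × Int × Int × Int × Int) (x : Int) : Int × Int × Int × Int × Int :=
  let counter :=
    if x = 1 ∧ st.2.1 = 0 ∧ st.2.2.1 = 0 ∧ st.2.2.2.1 = 0 ∧ st.2.2.2.2 ≠ 0
    then st.1 + 1 else st.1
  (counter, x, st.2.1, st.2.2.1, st.2.2.2.1)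

-- A's post-loop check
def pvFinA (st : Int × Int × Int × Int × Int) : Int :=
  if st.2.1 = 0 ∧ st.2.2.1 = 0 ∧ st.2.2.2.1 = 0 ∧ st.2.2.2.2 ≠ 0 then st.1 + 1 else st.1

def count_digits3 (arr : List Int) : Int :=
  pvFinA (arr.foldl pvStepA (0, 2, 2, 2, 2))

-- ===== PORT B =====
-- loop body of Source B: state (count, run)
def pvStepB (st : Int × Int) (x : Int) : Int × Int :=
  if x = 0 then (st.1, st.2 + 1)
  else (if st.2 = 3 ∧ x = 1 then st.1 + 1 else st.1, 0)

def count_digits3_alt (arr : List Int) : Int :=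
  let st := arr.foldl pvStepB (0, 0)
  if st.2 = 3 then st.1 + 1 else st.1

-- ===== PRECONDITION & SPEC =====
def Spec_count_digits3 (arr : List Int) (out : Int) : Prop := out = count_digits3_alt arr
instance (arr : List Int) (out : Int) : Decidable (Spec_count_digits3 arr out) := by unfold Spec_count_digits3; infer_instance

-- ===== CLAIM =====
def Claim_equal_count_digits3 : Prop := ∀ (arr : List Int), Dom_count_digits3 arr → Spec_count_digits3 arr (count_digits3 arr)

-- ===== LEMMAS AND PROOFS =====

-- relation between B's zero-run length and A's four look-back registers
def pvRel (run p1 p2 p3 p4 : Int) : Prop :=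
  (run = 0 ∧ p1 ≠ 0) ∨
  (run = 1 ∧ p1 = 0 ∧ p2 ≠ 0) ∨
  (run = 2 ∧ p1 = 0 ∧ p2 = 0 ∧ p3 ≠ 0) ∨
  (run = 3 ∧ p1 = 0 ∧ p2 = 0 ∧ p3 = 0 ∧ p4 ≠ 0) ∨
  (4 ≤ run ∧ p1 = 0 ∧ p2 = 0 ∧ p3 = 0 ∧ p4 = 0)

theorem pvKey (arr : List Int) (c p1 p2 p3 p4 run : Int) (h : pvRel run p1 p2 p3 p4) :
    pvFinA (arr.foldl pvStepA (c, p1, p2, p3, p4))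
      = (let st := arr.foldl pvStepB (c, run); if st.2 = 3 then st.1 + 1 else st.1) := by
  induction arr generalizing c p1 p2 p3 p4 run with
  | nil =>
    simp only [List.foldl_nil, pvFinA]
    unfold pvRel at h
    split_ifs with h1 h2 h2
    · rfl
    · exfalso
      obtain ⟨a, b, c', d⟩ := h1
      rcases h with h|h|h|h|h
      · exact h.2 a
      · exact h.2.2 b
      · exact h.2.2.2 c'
      · exact h2 h.1
      · exact d h.2.2.2.2
    · exfalso
      rcases h with h|h|h|h|h
      · omega
      · omega
      · omega
      · exact h1 ⟨h.2.1, h.2.2.1, h.2.2.2.1, h.2.2.2.2⟩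
      · omega
    · rfl
  | cons x xs ih =>
    simp only [List.foldl_cons, pvStepA, pvStepB]
    by_cases hx : x = 0
    · subst hx
      have hrel : pvRel (run + 1) 0 p1 p2 p3 := by
        unfold pvRel at h ⊢; rcases h with h|h|h|h|h <;> simp_all; omega
      have hcnt : (if (0:Int) = 1 ∧ p1 = 0 ∧ p2 = 0 ∧ p3 = 0 ∧ p4 ≠ 0 then c + 1 else c) = c := by
        simp
      rw [show (if (0:Int) = 1 ∧ p1 = 0 ∧ p2 = 0 ∧ p3 = 0 ∧ p4 ≠ 0 then c + 1 else c) = c from hcnt]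
      exact ih c 0 p1 p2 p3 (run + 1) hrel
    · have hrel : pvRel 0 x p1 p2 p3 := Or.inl ⟨rfl, hx⟩
      have hcond : (x = 1 ∧ p1 = 0 ∧ p2 = 0 ∧ p3 = 0 ∧ p4 ≠ 0) ↔ (run = 3 ∧ x = 1) := by
        unfold pvRel at h
        constructor
        · rintro ⟨hx1, h1, h2, h3, h4⟩
          refine ⟨?_, hx1⟩
          rcases h with h|h|h|h|h
          · exact absurd h1 h.2
          · exact absurd h2 h.2.2
          · exact absurd h3 h.2.2.2
          · exact h.1
          · exact absurd h.2.2.2.2 h4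
        · rintro ⟨hr3, hx1⟩
          rcases h with h|h|h|h|h
          · exact absurd hr3 (by omega)
          · exact absurd hr3 (by omega)
          · exact absurd hr3 (by omega)
          · exact ⟨hx1, h.2.1, h.2.2.1, h.2.2.2.1, h.2.2.2.2⟩
          · exact absurd hr3 (by omega)
      rw [if_neg hx]
      by_cases hc : x = 1 ∧ p1 = 0 ∧ p2 = 0 ∧ p3 = 0 ∧ p4 ≠ 0
      · rw [if_pos hc, if_pos (hcond.mp hc)]
        exact ih (c + 1) x p1 p2 p3 0 hrel
      · rw [if_neg hc, if_neg (fun hb => hc (hcond.mpr hb))]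
        exact ih c x p1 p2 p3 0 hrel

-- ===== VERDICT =====
theorem count_digits3_spec : Claim_equal_count_digits3 := by
  intro arr _
  unfold Spec_count_digits3 count_digits3 count_digits3_alt
  exact pvKey arr 0 2 2 2 2 0 (Or.inl ⟨rfl, by norm_num⟩)
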